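-- pv_equiv track=rewrite | github.com/youngbryan97/aura | core/consciousness/dreaming.py | _compose_reflection
-- ===== SOURCE A (Python) =====
-- def _compose_reflection(recent_events: str) -> str:
--     """Build a lightweight reflection without invoking the live cognition stack."""
--     lines = []
--     seen = set()
--     for raw_line in str(recent_events or "").splitlines():
--         compact = " ".join(raw_line.split()).strip()
--         if not compact or compact in seen:
--             continue
--         seen.add(compact)
--         lines.append(compact[:140])
--         if len(lines) >= 3:
--             break
--     if not lines:
--         return "I am integrating a quiet stretch of experience into continuity."
--     if len(lines) == 1:
--         return f"I am integrating this recent thread into continuity: {lines[0]}"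
--     return "I am integrating recurring patterns from recent experience: " + " | ".join(lines)
-- ===== SOURCE B (Python) =====
-- def _compose_reflection(recent_events: str) -> str:
--     """Build a lightweight reflection without invoking the live cognition stack."""
--
--     def take_distinct(items, k):
--         # classic filter-nub recursion: keep the head, delete its duplicates
--         # from the remainder, recurse for k-1 more picks
--         if k == 0 or not items:
--             return []
--         head = items[0]
--         return [head] + take_distinct([x for x in items[1:] if x != head], k - 1)
--
--     normalized = [" ".join(line.split()).strip()
--                   for line in str(recent_events or "").splitlines()]
--     picked = take_distinct([c for c in normalized if c], 3)
--     kept = [c[:140] for c in picked]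
--     if not kept:
--         return "I am integrating a quiet stretch of experience into continuity."
--     if len(kept) == 1:
--         return f"I am integrating this recent thread into continuity: {kept[0]}"
--     return "I am integrating recurring patterns from recent experience: " + " | ".join(kept)
-- ===== Notes on version B (the rewrite author's own statement) =====
-- stated objective: alternative
-- what changed: Replaces A's single accumulate loop with a mutable seen-set and early break by a filter-nub recursion: normalize and drop empty lines in staged passes, then recursively pick the head and delete its duplicates from the remaining input (no set, no seen state), stopping after 3 picks, then truncate and format.
import Mathlib
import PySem

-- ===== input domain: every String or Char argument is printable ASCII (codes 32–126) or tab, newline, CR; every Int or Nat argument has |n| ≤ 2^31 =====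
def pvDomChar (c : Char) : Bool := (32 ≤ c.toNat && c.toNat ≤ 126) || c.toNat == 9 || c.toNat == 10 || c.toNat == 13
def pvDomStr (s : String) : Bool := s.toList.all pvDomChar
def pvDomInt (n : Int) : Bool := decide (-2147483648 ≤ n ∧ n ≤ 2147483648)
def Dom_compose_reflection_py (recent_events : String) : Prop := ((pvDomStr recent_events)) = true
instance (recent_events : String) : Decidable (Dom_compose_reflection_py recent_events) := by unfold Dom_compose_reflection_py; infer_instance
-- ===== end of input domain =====

-- B replaces A's accumulate loop with a mutable seen set and early break by a filter-nub
-- recursion (pick the head, delete its duplicates from the remaining input, recurse, stop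
-- after 3 picks); same return value everywhere, same cost.

-- ===== PORT A =====
-- compact = " ".join(raw_line.split()).strip()
def pvNorm (raw : String) : String :=
  PySem.Str.strip (PySem.Str.join " " (PySem.Str.split₀ raw))

-- the for-loop of A, with early break once 3 lines are collected
def pvALoop : List String → List String → PySem.Set String → List String
  | [], lines, _ => lines
  | raw :: rest, lines, seen =>
    let compact := pvNorm raw
    if compact = "" ∨ PySem.Set.contains seen compact = true then
      pvALoop rest lines seen
    else
      let lines' := lines ++ [PySem.Str.slice compact none (some 140)]
      if 3 ≤ lines'.length then lines'
      else pvALoop rest lines' (PySem.Set.add seen compact)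

def compose_reflection_py (recent_events : String) : String :=
  if pvALoop (PySem.Str.splitlines (if recent_events = "" then "" else recent_events)) [] PySem.Set.empty = [] then
    "I am integrating a quiet stretch of experience into continuity."
  else if (pvALoop (PySem.Str.splitlines (if recent_events = "" then "" else recent_events)) [] PySem.Set.empty).length = 1 then
    "I am integrating this recent thread into continuity: " ++
      (PySem.List.pyGet? (pvALoop (PySem.Str.splitlines (if recent_events = "" then "" else recent_events)) [] PySem.Set.empty) 0).getD ""
  else
    "I am integrating recurring patterns from recent experience: " ++
      PySem.Str.join " | " (pvALoop (PySem.Str.splitlines (if recent_events = "" then "" else recent_events)) [] PySem.Set.empty)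

-- ===== PORT B =====
-- def take_distinct(items, k): if k == 0 or not items: return []
--   head = items[0]; return [head] + take_distinct([x for x in items[1:] if x != head], k - 1)
def pvTakeDistinct : List String → Nat → List String
  | [], _ => []
  | _ :: _, 0 => []
  | h :: t, m + 1 => h :: pvTakeDistinct (t.filter (fun x => x ≠ h)) m
termination_by items _ => items.length
decreasing_by
  simpa using Nat.lt_succ_of_le (le_trans (List.length_filter_le _ _) (le_of_eq (by simp)))

-- kept = [c[:140] for c in take_distinct([c for c in normalized if c], 3)]
def pvBKept (recent_events : String) : List String :=
  (pvTakeDistinct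
      ((((PySem.Str.splitlines (if recent_events = "" then "" else recent_events)).map pvNorm).filter
          (fun c => c ≠ "")))
      3).map (fun c => PySem.Str.slice c none (some 140))

def compose_reflection_py_alt (recent_events : String) : String :=
  if pvBKept recent_events = [] then
    "I am integrating a quiet stretch of experience into continuity."
  else if (pvBKept recent_events).length = 1 then
    "I am integrating this recent thread into continuity: " ++
      (PySem.List.pyGet? (pvBKept recent_events) 0).getD ""
  else
    "I am integrating recurring patterns from recent experience: " ++
      PySem.Str.join " | " (pvBKept recent_events)

-- ===== PRECONDITION & SPEC =====
def Spec_compose_reflection_py (recent_events : String) (out : String) : Prop := out = compose_reflection_py_alt recent_events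
instance (recent_events : String) (out : String) : Decidable (Spec_compose_reflection_py recent_events out) := by unfold Spec_compose_reflection_py; infer_instance

-- ===== CLAIM (what is proved, stated in full; the proofs are below) =====
def Claim_equal_compose_reflection_py : Prop := ∀ (recent_events : String), Dom_compose_reflection_py recent_events → Spec_compose_reflection_py recent_events (compose_reflection_py recent_events)

-- ===== LEMMAS AND PROOFS =====
-- A's loop, started from any partial state acc (nodup, no empty line, fewer than 3),
-- computes the ordered-dedup-then-take-3-then-truncate of the remaining normalized lines.
lemma pvALoop_eq (raws : List String) : ∀ (acc : List String), acc.Nodup → "" ∉ acc →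
    acc.length < 3 →
    pvALoop raws (acc.map (fun c => PySem.Str.slice c none (some 140))) acc =
      ((PySem.Set.update acc ((raws.map pvNorm).filter (fun c => c ≠ ""))).take 3).map
        (fun c => PySem.Str.slice c none (some 140)) := by
  induction raws with
  | nil =>
    intro acc hnd hne hlen
    simp [pvALoop, PySem.Set.update, List.take_of_length_le (Nat.le_of_lt hlen)]
  | cons raw rest ih =>
    intro acc hnd hne hlen
    by_cases hc : pvNorm raw = ""
    · simp only [pvALoop, hc]
      simpa [hc] using ih acc hnd hne hlen
    · rw [List.map_cons, List.filter_cons_of_pos (by simp [hc])]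
      by_cases hmem : pvNorm raw ∈ acc
      · simp only [pvALoop]
        rw [if_pos (Or.inr ((PySem.Set.contains_iff acc (pvNorm raw)).2 hmem))]
        rw [ih acc hnd hne hlen]
        rw [PySem.Set.update_cons, PySem.Set.add_of_mem hmem]
      · simp only [pvALoop]
        rw [if_neg (by
          rintro (h | h)
          · exact hc h
          · exact hmem ((PySem.Set.contains_iff acc (pvNorm raw)).1 h))]
        rw [PySem.Set.update_cons, PySem.Set.add_of_not_mem hmem]
        have hnd' : (acc ++ [pvNorm raw]).Nodup := by
          simp only [List.nodup_append, List.nodup_cons, List.not_mem_nil, not_false_eq_true,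
            List.nodup_nil, and_true, true_and, hnd]
          exact fun a ha => by simp; intro heq; exact hmem (heq ▸ ha)
        by_cases h3 : 3 ≤ (acc.map (fun c => PySem.Str.slice c none (some 140)) ++
            [PySem.Str.slice (pvNorm raw) none (some 140)]).length
        · rw [if_pos h3]
          have hlen2 : (acc ++ [pvNorm raw]).length = 3 := by
            simp at h3 ⊢; omega
          rw [PySem.Set.update_eq_append_filter (acc ++ [pvNorm raw])
            ((rest.map pvNorm).filter (fun c => c ≠ ""))]
          rw [← hlen2, List.take_left]
          simp
        · rw [if_neg h3]
          have hlt : (acc ++ [pvNorm raw]).length < 3 := by simp at h3 ⊢; omega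
          have hne' : "" ∉ acc ++ [pvNorm raw] := by
            simp only [List.mem_append, List.mem_singleton]
            rintro (h | h)
            · exact hne h
            · exact hc h.symm
          have := ih (acc ++ [pvNorm raw]) hnd' hne' hlt
          simpa using this

-- ofList peals off the head and removes its later duplicates
lemma pvOfList_cons (h : String) (t : List String) :
    PySem.Set.ofList (h :: t) = h :: (PySem.Set.ofList t).filter (fun y => y ≠ h) := by
  rw [show PySem.Set.ofList (h :: t) = PySem.Set.update [] (h :: t) from rfl]
  rw [PySem.Set.update_cons]
  rw [show PySem.Set.add ([] : PySem.Set String) h = [h] from rfl]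
  rw [PySem.Set.update_eq_append_filter]
  simp only [List.singleton_append, List.cons.injEq, true_and]
  apply List.filter_congr
  intro y _
  by_cases hy : y = h <;> simp [hy]

-- dedup (first occurrences) commutes with filtering
lemma pvOfList_filter (p : String → Bool) : ∀ (xs : List String),
    PySem.Set.ofList (xs.filter p) = (PySem.Set.ofList xs).filter p := by
  intro xs
  induction xs with
  | nil => rfl
  | cons h t ih =>
    by_cases hp : p h = true
    · rw [List.filter_cons_of_pos hp, pvOfList_cons, pvOfList_cons, ih,
        List.filter_cons_of_pos hp, List.filter_comm]
    · rw [List.filter_cons_of_neg (by simp [hp]), pvOfList_cons, ih,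
        List.filter_cons_of_neg (by simp [hp])]
      rw [List.filter_comm]
      refine (List.filter_eq_self.2 ?_).symm
      intro y hy
      have hyp := List.of_mem_filter hy
      simp only [decide_eq_true_eq]
      intro hyh
      rw [hyh] at hyp
      exact hp hyp

-- the filter-nub recursion computes take k of the ordered dedup
lemma pvTakeDistinct_eq : ∀ (n : Nat) (xs : List String) (k : Nat), xs.length ≤ n →
    pvTakeDistinct xs k = (PySem.Set.ofList xs).take k := by
  intro n
  induction n with
  | zero =>
    intro xs k hlen
    have : xs = [] := List.eq_nil_of_length_eq_zero (Nat.le_zero.1 hlen)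
    subst this
    cases k <;> simp [pvTakeDistinct]
  | succ n ih =>
    intro xs k hlen
    match xs, k with
    | [], k => cases k <;> simp [pvTakeDistinct]
    | _ :: _, 0 => simp [pvTakeDistinct]
    | h :: t, m + 1 =>
      rw [pvTakeDistinct, pvOfList_cons, List.take_succ_cons]
      congr 1
      rw [ih _ m (le_trans (t.length_filter_le _) (Nat.succ_le_succ_iff.1 hlen))]
      rw [pvOfList_filter]

lemma pvMain (recent_events : String) :
    pvALoop (PySem.Str.splitlines (if recent_events = "" then "" else recent_events)) []
      PySem.Set.empty = pvBKept recent_events := by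
  unfold pvBKept
  have h0 := pvALoop_eq
    (PySem.Str.splitlines (if recent_events = "" then "" else recent_events)) []
    (by simp) (by simp) (by simp)
  simp only [List.map_nil] at h0
  rw [show (PySem.Set.empty : PySem.Set String) = ([] : List String) from rfl]
  rw [h0]
  rw [pvTakeDistinct_eq _ _ 3 (le_refl _)]
  rw [show PySem.Set.update ([] : PySem.Set String) = PySem.Set.ofList from rfl]

-- ===== VERDICT (by name: the statement is the Claim_ definition above) =====
theorem compose_reflection_py_spec : Claim_equal_compose_reflection_py := by
  intro recent_events _
  unfold Spec_compose_reflection_py compose_reflection_py compose_reflection_py_alt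
  rw [pvMain]
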